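-- pv_equiv track=rewrite | github.com/loydp/Advent_of_Code | 2023/day3/day3.py | get_coords_from_line
-- ===== SOURCE A (Python) =====
-- def get_coords_from_line(line: str, line_num):
--     coords = []
--
--     i = 0
--     while i < len(line):
--         if line[i].isdigit():
--             start = i
--             digits = []
--             j = i
--             while j < len(line) and line[j].isdigit():
--                 digits += line[j]
--                 j += 1
--             end = start + len(digits)
--             i = end
--             digits = int("".join(digits))
--             coords.append((line_num, start, end, digits))
--         i += 1
--     return coords if coords else None
-- ===== SOURCE B (Python) =====
-- def get_coords_from_line(line: str, line_num):
--     d = [c.isdigit() for c in line]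
--     starts = [i for i in range(len(line)) if d[i] and (i == 0 or not d[i - 1])]
--     ends = [i + 1 for i in range(len(line)) if d[i] and (i + 1 == len(line) or not d[i + 1])]
--     coords = [(line_num, s, e, int(line[s:e])) for s, e in zip(starts, ends)]
--     return coords or None
-- ===== Notes on version B (the rewrite author's own statement) =====
-- stated objective: alternative
-- what changed: Replaced A's single-pass index-chasing scan (inner while to find each run's end, manual index jumps) by a staged boundary-detection pipeline: precompute the digit mask, filter run-start and run-end positions independently, zip them, and slice the line for each value.
import Mathlib
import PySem

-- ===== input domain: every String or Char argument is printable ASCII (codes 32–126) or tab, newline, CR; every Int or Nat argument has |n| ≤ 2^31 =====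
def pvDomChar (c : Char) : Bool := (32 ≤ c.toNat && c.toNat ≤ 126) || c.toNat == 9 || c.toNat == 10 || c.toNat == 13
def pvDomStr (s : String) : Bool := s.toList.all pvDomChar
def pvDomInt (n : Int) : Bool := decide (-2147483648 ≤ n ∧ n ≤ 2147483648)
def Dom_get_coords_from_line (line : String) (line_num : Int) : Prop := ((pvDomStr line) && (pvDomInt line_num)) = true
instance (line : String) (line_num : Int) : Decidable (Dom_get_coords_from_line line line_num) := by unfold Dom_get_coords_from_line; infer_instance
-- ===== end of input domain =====

-- B replaces A's single-pass index-chasing scan by a staged boundary-detection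
-- pipeline (digit mask, independent start/end filters, zip, slice); objective:
-- a genuinely different decomposition of the same O(n) task.

-- int("".join(digits)) / int(line[s:e]) — at every reached call the argument is
-- a nonempty run of '0'-'9', so int() never raises; getD 0 is only a totality guard.
def pvVal (digits : List Char) : Int := (PySem.Int.ofChars? digits).getD 0

-- ===== PORT A =====
-- inner loop: 'while j < len(line) and line[j].isdigit(): digits += line[j]; j += 1'
def pvATake (cs : List Char) (j : Nat) (digits : List Char) : List Char :=
  if h : j < cs.length then
    if PySem.Chars.isdigit cs[j] then pvATake cs (j+1) (digits ++ [cs[j]]) else digits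
  else digits
termination_by cs.length - j

-- outer 'while i < len(line)' loop
def pvAMain (cs : List Char) (i : Nat) (coords : List (Int × Int × Int × Int)) (ln : Int) :
    List (Int × Int × Int × Int) :=
  if h : i < cs.length then
    if PySem.Chars.isdigit cs[i] then
      let digits := pvATake cs i []
      let e := i + digits.length
      pvAMain cs (e+1) (coords ++ [(ln, (i : Int), (e : Int), pvVal digits)]) ln
    else pvAMain cs (i+1) coords ln
  else coords
termination_by cs.length - i
decreasing_by · omega
              · omega

def get_coords_from_line (line : String) (line_num : Int) : Option (List (Int × Int × Int × Int)) :=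
  let coords := pvAMain line.toList 0 [] line_num
  if coords.isEmpty then none else some coords

-- ===== PORT B =====
-- d = [c.isdigit() for c in line]; starts/ends = boundary filters; zip + slice
def get_coords_from_line_alt (line : String) (line_num : Int) : Option (List (Int × Int × Int × Int)) :=
  let cs := line.toList
  let n := cs.length
  let d := cs.map PySem.Chars.isdigit
  let starts := (List.range n).filter (fun i => d.getD i false && (decide (i = 0) || !(d.getD (i-1) false)))
  let ends := ((List.range n).filter (fun i => d.getD i false && (decide (i+1 = n) || !(d.getD (i+1) false)))).map (· + 1)
  let coords := (starts.zip ends).map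
    (fun se => (line_num, ((se.1 : Nat) : Int), ((se.2 : Nat) : Int),
                pvVal (PySem.List.slice cs (some ((se.1 : Nat) : Int)) (some ((se.2 : Nat) : Int)))))
  if coords.isEmpty then none else some coords

-- ===== PRECONDITION & SPEC =====
def Spec_get_coords_from_line (line : String) (line_num : Int) (out : Option (List (Int × Int × Int × Int))) : Prop := out = get_coords_from_line_alt line line_num
instance (line : String) (line_num : Int) (out : Option (List (Int × Int × Int × Int))) : Decidable (Spec_get_coords_from_line line line_num out) := by unfold Spec_get_coords_from_line; infer_instance

-- ===== CLAIM =====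
def Claim_equal_get_coords_from_line : Prop := ∀ (line : String) (line_num : Int), Dom_get_coords_from_line line line_num → Spec_get_coords_from_line line line_num (get_coords_from_line line line_num)

-- ===== LEMMAS AND PROOFS =====

-- digit mask lookup
def pvDg (cs : List Char) (j : Nat) : Bool := (cs.map PySem.Chars.isdigit).getD j false

-- start positions, generalized over the digit-ness of the previous character
def pvS (prev : Bool) (cs : List Char) : List Nat :=
  (List.range cs.length).filter (fun j => pvDg cs j && !(if j = 0 then prev else pvDg cs (j-1)))

-- end positions (last index of each run)
def pvE (cs : List Char) : List Nat :=
  (List.range cs.length).filter (fun j => pvDg cs j && !(pvDg cs (j+1)))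

-- B's coordinate list, in drop/take form
def pvBcoords (ln : Int) (cs : List Char) : List (Int × Int × Int × Int) :=
  ((pvS false cs).zip ((pvE cs).map (· + 1))).map
    (fun se => (ln, ((se.1 : Nat) : Int), ((se.2 : Nat) : Int), pvVal ((cs.drop se.1).take (se.2 - se.1))))

def pvShift (k : Nat) (x : Int × Int × Int × Int) : Int × Int × Int × Int :=
  (x.1, x.2.1 + (k : Int), x.2.2.1 + (k : Int), x.2.2.2)

-- canonical run decomposition (relative indices)
def pvG (ln : Int) : List Char → List (Int × Int × Int × Int)
  | [] => []
  | c :: rest =>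
    if PySem.Chars.isdigit c then
      let r := c :: rest.takeWhile PySem.Chars.isdigit
      (ln, 0, (r.length : Int), pvVal r) ::
        (pvG ln (rest.dropWhile PySem.Chars.isdigit)).map (pvShift r.length)
    else (pvG ln rest).map (pvShift 1)
termination_by cs => cs.length
decreasing_by
  · simp only [List.length_cons]
    have := List.length_dropWhile_le PySem.Chars.isdigit rest
    omega
  · simp

-- common mid-level description of A's loop
def pvSpecRun (cs : List Char) (i : Nat) (ln : Int) (acc : List (Int × Int × Int × Int)) :
    List (Int × Int × Int × Int) :=
  match cs with
  | [] => acc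
  | c :: rest =>
    if PySem.Chars.isdigit c then
      let d := c :: rest.takeWhile PySem.Chars.isdigit
      pvSpecRun ((rest.dropWhile PySem.Chars.isdigit).drop 1) (i + d.length + 1) ln
        (acc ++ [(ln, (i : Int), ((i + d.length : Nat) : Int), pvVal d)])
    else pvSpecRun rest (i+1) ln acc
termination_by cs.length
decreasing_by
  · simp only [List.length_cons, List.length_drop]
    have := List.length_dropWhile_le PySem.Chars.isdigit rest
    omega
  · simp

theorem pvATake_eq (cs : List Char) (j : Nat) (digits : List Char) :
    pvATake cs j digits = digits ++ (cs.drop j).takeWhile PySem.Chars.isdigit := by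
  fun_induction pvATake with
  | case1 j digits h hd ih =>
    rw [ih, List.drop_eq_getElem_cons h, List.takeWhile_cons_of_pos hd]
    simp
  | case2 j digits h hd =>
    rw [List.drop_eq_getElem_cons h, List.takeWhile_cons_of_neg (by simp [hd])]
    simp
  | case3 j digits h =>
    rw [List.drop_eq_nil_of_le (by omega)]
    simp

theorem pvAMain_eq (cs : List Char) (i : Nat) (acc : List (Int × Int × Int × Int)) (ln : Int) :
    pvAMain cs i acc ln = pvSpecRun (cs.drop i) i ln acc := by
  fun_induction pvAMain with
  | case1 i acc h hd digits e ih =>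
    have htw := pvATake_eq cs i []
    rw [List.drop_eq_getElem_cons h, List.takeWhile_cons_of_pos hd] at htw
    set tw := List.takeWhile PySem.Chars.isdigit (List.drop (i+1) cs) with htwdef
    set dw := List.dropWhile PySem.Chars.isdigit (List.drop (i+1) cs) with hdwdef
    have htake : digits = cs[i] :: tw := by simpa using htw
    have hlen : e = i + 1 + tw.length := by
      show i + digits.length = _
      rw [htake]; simp; omega
    have hsplit : List.drop (i+1) cs = tw ++ dw := (List.takeWhile_append_dropWhile).symm
    have hsuf : List.drop (e+1) cs = dw.drop 1 := by
      rw [hlen]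
      have harith : i + 1 + tw.length + 1 = (i + 1) + (tw.length + 1) := by omega
      rw [harith, ← List.drop_drop, hsplit, List.drop_append]
      have h1 : tw.length + 1 - tw.length = 1 := by omega
      rw [h1, List.drop_eq_nil_of_le (by omega)]
      simp
    rw [ih]
    conv_rhs => rw [List.drop_eq_getElem_cons h, pvSpecRun]
    rw [if_pos hd]
    rw [hsuf, ← htake]
  | case2 i acc h hd ih =>
    rw [ih, List.drop_eq_getElem_cons h]
    conv_rhs => rw [pvSpecRun]
    rw [if_neg hd]
  | case3 i acc h =>
    rw [List.drop_eq_nil_of_le (by omega), pvSpecRun]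

theorem pvDg_cons_zero (c : Char) (t : List Char) : pvDg (c :: t) 0 = PySem.Chars.isdigit c := by
  simp [pvDg]

theorem pvDg_cons_succ (c : Char) (t : List Char) (j : Nat) : pvDg (c :: t) (j+1) = pvDg t j := by
  simp [pvDg]

theorem pvS_cons (prev : Bool) (c : Char) (t : List Char) :
    pvS prev (c :: t) =
      (if PySem.Chars.isdigit c && !prev then [0] else []) ++ (pvS (PySem.Chars.isdigit c) t).map (· + 1) := by
  unfold pvS
  rw [List.length_cons, List.range_succ_eq_map, List.filter_cons, List.filter_map]
  have hp : ∀ j : Nat,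
      (fun j => pvDg (c :: t) j && !(if j = 0 then prev else pvDg (c :: t) (j-1))) (j+1) =
      (fun j => pvDg t j && !(if j = 0 then PySem.Chars.isdigit c else pvDg t (j-1))) j := by
    intro j
    cases j with
    | zero => simp [pvDg_cons_succ, pvDg_cons_zero]
    | succ j => simp [pvDg_cons_succ]
  have hfe : (fun j => pvDg (c :: t) j && !(if j = 0 then prev else pvDg (c :: t) (j-1))) ∘ Nat.succ =
      (fun j => pvDg t j && !(if j = 0 then PySem.Chars.isdigit c else pvDg t (j-1))) := by
    funext j; exact hp j
  rw [hfe]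
  by_cases hc : (PySem.Chars.isdigit c && !prev) = true
  · rw [if_pos (by simp [pvDg_cons_zero]; simp at hc; tauto), if_pos hc]
    simp
  · rw [if_neg (by simp [pvDg_cons_zero]; simp at hc ⊢; intro h1; have := hc h1; simp [this]), if_neg hc]
    simp

theorem pvE_cons (c : Char) (t : List Char) :
    pvE (c :: t) = (if PySem.Chars.isdigit c && !(pvDg t 0) then [0] else []) ++ (pvE t).map (· + 1) := by
  unfold pvE
  rw [List.length_cons, List.range_succ_eq_map, List.filter_cons, List.filter_map]
  have hfe : (fun j => pvDg (c :: t) j && !(pvDg (c :: t) (j+1))) ∘ Nat.succ =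
      (fun j => pvDg t j && !(pvDg t (j+1))) := by
    funext j; simp [Nat.succ_eq_add_one, pvDg_cons_succ]
  rw [hfe]
  by_cases hc : (PySem.Chars.isdigit c && !(pvDg t 0)) = true
  · rw [if_pos (by simp [pvDg_cons_zero, pvDg_cons_succ]; simp at hc; tauto), if_pos hc]
    simp
  · rw [if_neg (by simp [pvDg_cons_zero, pvDg_cons_succ]; simp at hc ⊢; intro h1; have := hc h1; simp [this]), if_neg hc]
    simp

theorem pvShift_comp (a b : Nat) (x : Int × Int × Int × Int) :
    pvShift a (pvShift b x) = pvShift (a + b) x := by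
  unfold pvShift
  push_cast
  refine Prod.ext rfl (Prod.ext ?_ (Prod.ext ?_ rfl)) <;> simp <;> ring

theorem pvShift_zero (x : Int × Int × Int × Int) : pvShift 0 x = x := by
  unfold pvShift
  simp

theorem pvS_true_eq_false (rest : List Char) (h0 : pvDg rest 0 = false) :
    pvS true rest = pvS false rest := by
  unfold pvS
  congr 1
  funext j
  cases j with
  | zero => simp [h0]
  | succ j => rfl

theorem pvS_run_true (r : List Char) : ∀ (rest : List Char),
    (∀ x ∈ r, PySem.Chars.isdigit x = true) → pvDg rest 0 = false →
    pvS true (r ++ rest) = (pvS false rest).map (· + r.length) := by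
  induction r with
  | nil =>
    intro rest _ h0
    rw [List.nil_append, pvS_true_eq_false rest h0]
    simp
  | cons c r' ih =>
    intro rest hall h0
    have hc : PySem.Chars.isdigit c = true := hall c (by simp)
    rw [List.cons_append, pvS_cons, if_neg (by simp [hc]), List.nil_append, hc,
      ih rest (fun x hx => hall x (by simp [hx])) h0, List.map_map]
    have hf : ((fun x => x + 1) ∘ fun x => x + r'.length) = (fun x : Nat => x + (c :: r').length) := by
      funext x; simp; omega
    rw [hf]

theorem pvS_run (r rest : List Char) (hne : r ≠ [])
    (hall : ∀ x ∈ r, PySem.Chars.isdigit x = true) (h0 : pvDg rest 0 = false) :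
    pvS false (r ++ rest) = 0 :: (pvS false rest).map (· + r.length) := by
  match r with
  | c :: r' =>
    have hc : PySem.Chars.isdigit c = true := hall c (by simp)
    rw [List.cons_append, pvS_cons, if_pos (by simp [hc]), hc,
      pvS_run_true r' rest (fun x hx => hall x (by simp [hx])) h0, List.map_map]
    simp only [List.singleton_append]
    have hf : ((fun x => x + 1) ∘ fun x => x + r'.length) = (fun x : Nat => x + (c :: r').length) := by
      funext x; simp; omega
    rw [hf]

theorem pvE_run (r : List Char) : ∀ (rest : List Char), r ≠ [] →
    (∀ x ∈ r, PySem.Chars.isdigit x = true) → pvDg rest 0 = false →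
    pvE (r ++ rest) = (r.length - 1) :: (pvE rest).map (· + r.length) := by
  induction r with
  | nil => intro rest h; simp at h
  | cons c r' ih =>
    intro rest _ hall h0
    have hc : PySem.Chars.isdigit c = true := hall c (by simp)
    match r' with
    | [] =>
      rw [List.cons_append, List.nil_append, pvE_cons, if_pos (by simp [hc, h0])]
      simp
    | c2 :: r'' =>
      have hc2 : PySem.Chars.isdigit c2 = true := hall c2 (by simp)
      rw [List.cons_append, pvE_cons, if_neg (by simp [pvDg_cons_zero, hc2]), List.nil_append,
        ih rest (by simp) (fun x hx => hall x (by simp [hx])) h0, List.map_cons, List.map_map]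
      have hf : ((fun x => x + 1) ∘ fun x => x + (c2 :: r'').length) = (fun x : Nat => x + (c :: c2 :: r'').length) := by
        funext x; simp; omega
      rw [hf]
      congr 1


theorem pvMap_shift_shift (a b : Nat) (l : List (Int × Int × Int × Int)) :
    (l.map (pvShift b)).map (pvShift a) = l.map (pvShift (a + b)) := by
  rw [List.map_map]
  congr 1
  funext x
  exact pvShift_comp a b x

-- B's entry function
def pvEntry (ln : Int) (cs : List Char) (se : Nat × Nat) : Int × Int × Int × Int :=
  (ln, (se.1 : Int), (se.2 : Int), pvVal ((cs.drop se.1).take (se.2 - se.1)))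

theorem pvBcoords_def' (ln : Int) (cs : List Char) :
    pvBcoords ln cs = ((pvS false cs).zip ((pvE cs).map (· + 1))).map (pvEntry ln cs) := rfl

theorem pvEntry_shift (ln : Int) (r rest : List Char) (k : Nat) (hk : k = r.length) (se : Nat × Nat) :
    pvEntry ln (r ++ rest) (Prod.map (· + k) (· + k) se) = pvShift k (pvEntry ln rest se) := by
  unfold pvEntry pvShift Prod.map
  obtain ⟨s, e⟩ := se
  simp only
  have h1 : (r ++ rest).drop (s + k) = rest.drop s := by
    rw [List.drop_append, List.drop_eq_nil_of_le (by omega), List.nil_append]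
    congr 1
    omega
  have h2 : e + k - (s + k) = e - s := by omega
  rw [h1, h2]
  push_cast
  rfl

theorem pvBcoords_run (ln : Int) (r rest : List Char) (hne : r ≠ [])
    (hall : ∀ x ∈ r, PySem.Chars.isdigit x = true) (h0 : pvDg rest 0 = false) :
    pvBcoords ln (r ++ rest) =
      (ln, 0, (r.length : Int), pvVal r) :: (pvBcoords ln rest).map (pvShift r.length) := by
  rw [pvBcoords_def', pvBcoords_def',
    pvS_run r rest hne hall h0, pvE_run r rest hne hall h0, List.map_cons]
  have hk : r.length - 1 + 1 = r.length := by
    cases r with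
    | nil => exact absurd rfl hne
    | cons a l => simp
  rw [hk]
  have hcomm : ((pvE rest).map (· + r.length)).map (· + 1) = ((pvE rest).map (· + 1)).map (· + r.length) := by
    rw [List.map_map, List.map_map]
    congr 1
    funext x
    simp
    omega
  rw [hcomm, List.zip_cons_cons, List.map_cons, List.zip_map, List.map_map, List.map_map]
  congr 1
  · unfold pvEntry
    simp
  · exact List.map_congr_left (fun se _ => pvEntry_shift ln r rest r.length rfl se)

theorem pvDg_nil (j : Nat) : pvDg [] j = false := by simp [pvDg]

theorem pvG_nondigit (ln : Int) (c : Char) (t : List Char) (hd : ¬ PySem.Chars.isdigit c = true) :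
    pvG ln (c :: t) = (pvG ln t).map (pvShift 1) := by
  rw [pvG]
  simp [hd]

theorem pvB_eq_G (ln : Int) : ∀ (n : Nat) (cs : List Char), cs.length ≤ n →
    pvBcoords ln cs = pvG ln cs := by
  intro n
  induction n with
  | zero =>
    intro cs hcs
    have : cs = [] := by cases cs <;> simp_all
    subst this
    rw [pvG]
    rfl
  | succ n ihn =>
    intro cs hcs
    match cs with
    | [] => rw [pvG]; rfl
    | c :: t =>
      by_cases hd : PySem.Chars.isdigit c = true
      · have hsplit : c :: t = (c :: t.takeWhile PySem.Chars.isdigit) ++ t.dropWhile PySem.Chars.isdigit := by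
          rw [List.cons_append, List.takeWhile_append_dropWhile]
        have hall : ∀ x ∈ c :: t.takeWhile PySem.Chars.isdigit, PySem.Chars.isdigit x = true := by
          intro x hx
          rcases List.mem_cons.mp hx with h | h
          · subst h; exact hd
          · exact List.mem_takeWhile_imp h
        have h0 : pvDg (t.dropWhile PySem.Chars.isdigit) 0 = false := by
          cases hre : t.dropWhile PySem.Chars.isdigit with
          | nil => exact pvDg_nil 0
          | cons x r2 =>
            have hne : t.dropWhile PySem.Chars.isdigit ≠ [] := by rw [hre]; simp
            have hx := List.head_dropWhile_not (p := PySem.Chars.isdigit) (l := t) hne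
            simp only [hre] at hx
            rw [pvDg_cons_zero]
            simpa using hx
        have hlen : (t.dropWhile PySem.Chars.isdigit).length ≤ n := by
          have := List.length_dropWhile_le PySem.Chars.isdigit t
          simp at hcs
          omega
        rw [hsplit, pvBcoords_run ln _ _ (by simp) hall h0, ihn _ hlen]
        conv_rhs => rw [← hsplit, pvG]
        rw [if_pos hd]
      · have hlen : t.length ≤ n := by simp at hcs; omega
        have hdf : PySem.Chars.isdigit c = false := by simpa using hd
        rw [pvBcoords_def', pvS_cons, pvE_cons, if_neg (by simp [hdf]), if_neg (by simp [hdf]),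
          List.nil_append, List.nil_append, hdf, List.zip_map, List.map_map]
        rw [pvG_nondigit ln c t hd, ← ihn _ hlen, pvBcoords_def', List.map_map]
        exact List.map_congr_left (fun se _ => pvEntry_shift ln [c] t 1 rfl se)

theorem pvSpecRun_eq (cs : List Char) (i : Nat) (ln : Int) (acc : List (Int × Int × Int × Int)) :
    pvSpecRun cs i ln acc = acc ++ (pvG ln cs).map (pvShift i) := by
  fun_induction pvSpecRun with
  | case1 => rw [pvG]; simp
  | case2 i acc c rest hd d ih =>
    rw [ih, List.append_assoc]
    congr 1
    conv_rhs => rw [pvG]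
    rw [if_pos hd, List.map_cons, List.singleton_append]
    congr 1
    · unfold pvShift
      refine Prod.ext rfl (Prod.ext ?_ (Prod.ext ?_ rfl))
      · simp
      · simp only
        push_cast
        ring
    · rw [pvMap_shift_shift]
      cases hre : rest.dropWhile PySem.Chars.isdigit with
      | nil => simp [pvG]
      | cons x r2 =>
        have hne : rest.dropWhile PySem.Chars.isdigit ≠ [] := by rw [hre]; simp
        have hx := List.head_dropWhile_not (p := PySem.Chars.isdigit) (l := rest) hne
        simp only [hre] at hx
        simp only [List.head_cons] at hx
        rw [pvG_nondigit ln x r2 (by simp [hx]), pvMap_shift_shift, List.drop_one, List.tail_cons]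
  | case3 i acc c rest hd ih =>
    rw [ih]
    conv_rhs => rw [pvG]
    rw [if_neg hd, pvMap_shift_shift]

theorem pvStarts_conv (cs : List Char) :
    (List.range cs.length).filter
      (fun i => (cs.map PySem.Chars.isdigit).getD i false &&
        (decide (i = 0) || !((cs.map PySem.Chars.isdigit).getD (i-1) false))) = pvS false cs := by
  unfold pvS pvDg
  apply List.filter_congr
  intro j _
  cases j with
  | zero => simp
  | succ j => simp

theorem pvEnds_conv (cs : List Char) :
    (List.range cs.length).filter
      (fun i => (cs.map PySem.Chars.isdigit).getD i false &&
        (decide (i+1 = cs.length) || !((cs.map PySem.Chars.isdigit).getD (i+1) false))) = pvE cs := by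
  unfold pvE pvDg
  apply List.filter_congr
  intro j hjmem
  by_cases hj : j + 1 = cs.length
  · have hz : (cs.map PySem.Chars.isdigit).getD (j+1) false = false := by
      rw [List.getD_eq_default]
      simp
      omega
    simp [hj]
  · have hd : decide (j + 1 = cs.length) = false := by simp [hj]
    rw [hd, Bool.false_or]

theorem pvMap_shift_zero (l : List (Int × Int × Int × Int)) : l.map (pvShift 0) = l := by
  induction l with
  | nil => rfl
  | cons a t ih => simp [pvShift_zero, ih]

-- ===== VERDICT (by name: the statement is the Claim_ definition above) =====
theorem get_coords_from_line_spec : Claim_equal_get_coords_from_line := by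
  intro line ln _
  unfold Spec_get_coords_from_line get_coords_from_line get_coords_from_line_alt
  dsimp only
  rw [pvAMain_eq, List.drop_zero, pvSpecRun_eq, List.nil_append, pvStarts_conv, pvEnds_conv]
  have hslice : (fun se : Nat × Nat =>
        (ln, ((se.1 : Nat) : Int), ((se.2 : Nat) : Int),
          pvVal (PySem.List.slice line.toList (some ((se.1 : Nat) : Int)) (some ((se.2 : Nat) : Int))))) =
      pvEntry ln line.toList := by
    funext se
    unfold pvEntry
    rw [PySem.List.slice_natCast]
  rw [hslice, ← pvBcoords_def', pvB_eq_G ln line.toList.length line.toList le_rfl, pvMap_shift_zero]
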